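-- pv_equiv track=rewrite | github.com/Beschuetzer/Python-Learning | Drawing Geometric Shapes and Fractals.py | get_minimums
-- ===== SOURCE A (Python) =====
-- def get_minimums(points):
--     x = points[0][0]
--     y = points[0][1]
--     for p in points[1:]:
--         if p[0] < x:
--             x = p[0]
--         if p[1] < y:
--             y = p[1]
--     assert y == x, 'Object must be a square'
--     return x,y
-- ===== SOURCE B (Python) =====
-- def get_minimums(points):
--     # Sort-based: the first element of a list sorted by a coordinate
--     # carries the minimum of that coordinate.
--     x = sorted(points, key=lambda p: p[0])[0][0]
--     y = sorted(points, key=lambda p: p[1])[0][1]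
--     assert y == x, 'Object must be a square'
--     return x, y
-- ===== Notes on version B (the rewrite author's own statement) =====
-- stated objective: alternative
-- what changed: B replaces A's single fused running-minimum loop by two stable sorts keyed on each coordinate, taking the first element of each sorted list as that coordinate's minimum.
import Mathlib
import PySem

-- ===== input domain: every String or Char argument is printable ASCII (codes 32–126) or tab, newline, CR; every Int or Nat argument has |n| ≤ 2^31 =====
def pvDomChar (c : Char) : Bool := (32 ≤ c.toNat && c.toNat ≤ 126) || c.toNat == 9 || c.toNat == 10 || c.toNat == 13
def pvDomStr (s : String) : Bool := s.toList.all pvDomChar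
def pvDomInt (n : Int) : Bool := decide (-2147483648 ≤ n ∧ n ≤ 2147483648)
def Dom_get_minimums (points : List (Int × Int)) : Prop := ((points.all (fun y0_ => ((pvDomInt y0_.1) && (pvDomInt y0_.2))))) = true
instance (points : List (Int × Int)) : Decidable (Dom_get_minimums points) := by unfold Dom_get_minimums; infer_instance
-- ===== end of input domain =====

-- B replaces A's fused running-minimum loop by two stable sorts keyed on each
-- coordinate, reading each minimum off the first element (alternative algorithm).

-- ===== PORT A =====
-- A: first point's coordinates, then a running-minimum loop over points[1:].
-- The empty-list IndexError and the failing assert are excluded by Pre_.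
def get_minimums (points : List (Int × Int)) : Int × Int :=
  match PySem.List.pyGet? points 0 with
  | none => (0, 0)  -- IndexError on points[0]; outside Pre_
  | some p0 =>
    (PySem.List.slice points (some 1) none).foldl
      (fun (xy : Int × Int) p =>
        let x := if p.1 < xy.1 then p.1 else xy.1
        let y := if p.2 < xy.2 then p.2 else xy.2
        (x, y)) (p0.1, p0.2)

-- ===== PORT B =====
-- B: sorted(points, key=p[0])[0][0] and sorted(points, key=p[1])[0][1].
def get_minimums_alt (points : List (Int × Int)) : Int × Int :=
  match PySem.List.pyGet? (PySem.List.sorted points (fun p => p.1) false) 0,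
        PySem.List.pyGet? (PySem.List.sorted points (fun p => p.2) false) 0 with
  | some px, some py => (px.1, py.2)
  | _, _ => (0, 0)  -- empty input: both Pythons raise IndexError; outside Pre_

-- ===== PRECONDITION & SPEC =====
-- Pre_ excludes exactly the inputs where A raises: the empty list (IndexError)
-- and inputs whose two coordinate minima differ (AssertionError from the assert).
def Pre_get_minimums (points : List (Int × Int)) : Prop :=
  points ≠ [] ∧
  PySem.List.min? (points.map Prod.fst) (fun v => v) =
    PySem.List.min? (points.map Prod.snd) (fun v => v)
instance (points : List (Int × Int)) : Decidable (Pre_get_minimums points) := by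
  unfold Pre_get_minimums; infer_instance
def pvWitness_get_minimums : (List (Int × Int)) := [(3, 5), (1, 1), (2, 7)]

def Spec_get_minimums (points : List (Int × Int)) (out : Int × Int) : Prop := out = get_minimums_alt points
instance (points : List (Int × Int)) (out : Int × Int) : Decidable (Spec_get_minimums points out) := by unfold Spec_get_minimums; infer_instance

-- ===== CLAIM (what is proved, stated in full; the proofs are below) =====
def Claim_equal_get_minimums : Prop := ∀ (points : List (Int × Int)), Dom_get_minimums points → Pre_get_minimums points → Spec_get_minimums points (get_minimums points)

-- ===== LEMMAS AND PROOFS =====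

-- A's fused running-minimum loop computes the pair of per-column foldl-mins.
theorem foldA_eq_pair (l : List (Int × Int)) (a b : Int) :
    l.foldl
      (fun (xy : Int × Int) p =>
        let x := if p.1 < xy.1 then p.1 else xy.1
        let y := if p.2 < xy.2 then p.2 else xy.2
        (x, y)) (a, b)
      = ((l.map Prod.fst).foldl min a, (l.map Prod.snd).foldl min b) := by
  induction l generalizing a b with
  | nil => rfl
  | cons p t ih =>
    simp only [List.foldl_cons, List.map_cons, ih]
    congr 2 <;> (rw [min_def]; split_ifs <;> omega)

-- The key of the head of a key-sorted nonempty list is the running foldl-min of the keys.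
theorem head_sorted_key_eq_foldl_min (key : Int × Int → Int) (p : Int × Int)
    (t : List (Int × Int)) (m : Int × Int) (tm : List (Int × Int))
    (hs : PySem.List.sorted (p :: t) key false = m :: tm) :
    key m = (t.map key).foldl min (key p) := by
  have hmin : PySem.List.min? ((p :: t).map key) (fun v => v)
      = some ((t.map key).foldl min (key p)) := by
    simp [PySem.List.min?_id_cons]
  have hle : ∀ y ∈ (p :: t), key m ≤ key y :=
    PySem.List.key_head_sorted_le (p :: t) key hs
  have hmem : m ∈ (p :: t) := by
    have := PySem.List.sorted_perm (xs := p :: t) (key := key) (rev := false)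
    rw [hs] at this
    exact this.mem_iff.mp (List.mem_cons_self ..)
  -- the foldl-min value is attained and is a lower bound
  have hvmem := PySem.List.min?_mem hmin
  have hvmin := PySem.List.min?_isMin hmin
  obtain ⟨q, hq, hv⟩ := List.mem_map.mp hvmem
  apply le_antisymm
  · rw [← hv]; exact hle q hq
  · exact hvmin (key m) (List.mem_map_of_mem hmem)

-- ===== VERDICT (by name: the statement is the Claim_ definition above) =====
theorem get_minimums_spec : Claim_equal_get_minimums := by
  intro points _ hpre
  obtain ⟨hne, _⟩ := hpre
  obtain ⟨p0, t, rfl⟩ := List.exists_cons_of_ne_nil hne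
  unfold Spec_get_minimums get_minimums get_minimums_alt
  obtain ⟨mx, tx, hx⟩ : ∃ mx tx,
      PySem.List.sorted (p0 :: t) (fun p => p.1) false = mx :: tx := by
    rcases h : PySem.List.sorted (p0 :: t) (fun p => p.1) false with _ | ⟨a, b⟩
    · exact absurd ((PySem.List.sorted_eq_nil_iff _ _ _).mp h) (List.cons_ne_nil _ _)
    · exact ⟨a, b, rfl⟩
  obtain ⟨my, ty, hy⟩ : ∃ my ty,
      PySem.List.sorted (p0 :: t) (fun p => p.2) false = my :: ty := by
    rcases h : PySem.List.sorted (p0 :: t) (fun p => p.2) false with _ | ⟨a, b⟩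
    · exact absurd ((PySem.List.sorted_eq_nil_iff _ _ _).mp h) (List.cons_ne_nil _ _)
    · exact ⟨a, b, rfl⟩
  have hmx := head_sorted_key_eq_foldl_min (fun p => p.1) p0 t mx tx hx
  have hmy := head_sorted_key_eq_foldl_min (fun p => p.2) p0 t my ty hy
  simp only [hx, hy, PySem.List.pyGet?_zero_cons, PySem.List.slice_from_one,
    List.tail_cons, foldA_eq_pair, hmx, hmy]
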